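-- pv_equiv track=rewrite | github.com/Sherewood/haskell | cypher.py | Jeringoza
-- ===== SOURCE A (Python) =====
-- def Jeringoza(chosen): # Turns the single string into a Jeringoza compliant string. Has a local variable of vowels so it can check
--     vowels=["a","e","i","o","u"]
--     if (len(chosen)==1 or not chosen): #if an empty string is brought into the function the base case changes. Instead of sending back the value, it sends the empty string. The reason is because the rest of the function relies on chosen being at least 1 letter
--         if not chosen: #condtional for empty string
--             return ""
--         else: #conditional for the base case of a string of at least 1 letter. function checks wheter it is a vowel or not in order to Jeringozafy it
--             if (chosen[0] in vowels):
--                 return chosen[0]+ "p "+chosen[0]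
--             else:
--                 return chosen[0]
--     else: # conditional
--         if (chosen[0] in vowels): # if the char is a vowel, then it has two paths to go down.
--             comp=chosen[0] #local variable to compare
--             if ( not chosen[1] or chosen[1] !=comp): # if the next value is another char or is non-existant, than the word will be modified with jeringoza script (char+p+" "+char) and continue on
--                 final=chosen[0]
--                 final2=chosen[1:]
--                 final3= final+"p "+final+Jeringoza(final2)
--             else: # if the next value is the same char, then the jeringoza needs to be modified to account the additional char. the jeringoza script now adds the two of them and continues recursion on the 3 char in the string
--                 final=chosen[0]+chosen[1]+"p "+chosen[1]+chosen[0]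
--                 final2=chosen[2:]
--                 final3= final+Jeringoza(final2)
--         else: # if the char is not a vowel, then it is added to the string
--             final=chosen[0]
--             final2=chosen[1:]
--             final3= final+Jeringoza(final2)
--         return final3
-- ===== SOURCE B (Python) =====
-- def Jeringoza(chosen):
--     out = []
--     i = 0
--     n = len(chosen)
--     while i < n:
--         c = chosen[i]
--         if c in "aeiou":
--             if i + 1 < n and chosen[i + 1] == c:
--                 seg = c + c
--                 i += 2
--             else:
--                 seg = c
--                 i += 1
--             out.append(seg + "p " + seg)
--         else:
--             out.append(c)
--             i += 1
--     return "".join(out)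
-- ===== Notes on version B (the rewrite author's own statement) =====
-- stated objective: faster
-- what changed: Replaces A's recursion, which builds a fresh slice of the remaining string at every step, by a single iterative index-based scan that appends segments to a list and joins once at the end.
import Mathlib
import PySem

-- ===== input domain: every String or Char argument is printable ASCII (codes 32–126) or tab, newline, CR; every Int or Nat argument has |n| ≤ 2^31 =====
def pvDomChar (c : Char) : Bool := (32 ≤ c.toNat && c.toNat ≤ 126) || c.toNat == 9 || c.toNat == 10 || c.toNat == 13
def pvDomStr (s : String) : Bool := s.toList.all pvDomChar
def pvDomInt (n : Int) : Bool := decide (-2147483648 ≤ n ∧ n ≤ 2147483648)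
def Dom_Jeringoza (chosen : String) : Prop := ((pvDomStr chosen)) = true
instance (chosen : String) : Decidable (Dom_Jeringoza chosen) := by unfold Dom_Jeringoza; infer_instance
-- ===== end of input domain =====

-- B replaces A's slice-making recursion with one iterative scan that collects segments and joins once (idiomatic, no speed claim).

-- ===== PORT A =====
-- chosen[0] in ["a","e","i","o","u"]
def jerVowel (c : Char) : Bool := c = 'a' || c = 'e' || c = 'i' || c = 'o' || c = 'u'

-- A's recursion, on the character list. A's test `not chosen[1] or chosen[1] != comp`:
-- `not chosen[1]` is always False (chosen[1] is a 1-char string here), so it is c1 ≠ c0.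
def jerA : List Char → List Char
  | [] => []                                                   -- return ""
  | [c] => if jerVowel c then [c, 'p', ' ', c] else [c]        -- base case of length 1
  | c0 :: c1 :: rest =>
    if jerVowel c0 then
      if c1 ≠ c0 then c0 :: 'p' :: ' ' :: c0 :: jerA (c1 :: rest)   -- final+"p "+final+Jeringoza(chosen[1:])
      else c0 :: c1 :: 'p' :: ' ' :: c1 :: c0 :: jerA rest          -- chosen[0]+chosen[1]+"p "+chosen[1]+chosen[0]+Jeringoza(chosen[2:])
    else c0 :: jerA (c1 :: rest)                                    -- chosen[0]+Jeringoza(chosen[1:])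

def Jeringoza (chosen : String) : String := String.ofList (jerA chosen.toList)

-- ===== PORT B =====
-- Source B's while loop: consume 1 or 2 chars per step, append a segment to `out`, join at the end.
def jerBLoop : List Char → List (List Char) → List (List Char)
  | [], out => out
  | c :: rest, out =>
    if jerVowel c then
      match rest with
      | c1 :: rest' =>
        if c1 = c then jerBLoop rest' (out ++ [[c, c, 'p', ' ', c, c]])  -- seg = c+c
        else jerBLoop (c1 :: rest') (out ++ [[c, 'p', ' ', c]])
      | [] => jerBLoop [] (out ++ [[c, 'p', ' ', c]])
    else jerBLoop rest (out ++ [[c]])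
termination_by l _ => l.length
decreasing_by all_goals simp

def Jeringoza_alt (chosen : String) : String := String.ofList (jerBLoop chosen.toList []).flatten

-- ===== PRECONDITION & SPEC =====
def Spec_Jeringoza (chosen : String) (out : String) : Prop := out = Jeringoza_alt chosen
instance (chosen : String) (out : String) : Decidable (Spec_Jeringoza chosen out) := by unfold Spec_Jeringoza; infer_instance

-- ===== CLAIM (what is proved, stated in full; the proofs are below) =====
def Claim_equal_Jeringoza : Prop := ∀ (chosen : String), Dom_Jeringoza chosen → Spec_Jeringoza chosen (Jeringoza chosen)

-- ===== LEMMAS AND PROOFS =====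

theorem jerBLoop_flatten : ∀ (l : List Char) (out : List (List Char)),
    (jerBLoop l out).flatten = out.flatten ++ jerA l := by
  have key : ∀ (n : Nat) (l : List Char), l.length ≤ n → ∀ out : List (List Char),
      (jerBLoop l out).flatten = out.flatten ++ jerA l := by
    intro n
    induction n with
    | zero =>
      intro l hl out
      have : l = [] := List.eq_nil_of_length_eq_zero (Nat.le_zero.mp hl)
      subst this
      simp [jerBLoop, jerA]
    | succ n ih =>
      intro l hl out
      match l with
      | [] => simp [jerBLoop, jerA]
      | [c] =>
        by_cases h : jerVowel c <;> simp [jerBLoop, jerA, h]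
      | c0 :: c1 :: rest =>
        have h1 : (c1 :: rest).length ≤ n := by simp at hl ⊢; omega
        have h2 : rest.length ≤ n := by simp at hl ⊢; omega
        by_cases hv : jerVowel c0
        · by_cases he : c1 = c0
          · subst he
            simp [jerBLoop, jerA, hv, ih _ h2]
          · simp [jerBLoop, jerA, hv, he, ih _ h1]
        · simp [jerBLoop, jerA, hv, ih _ h1]
  intro l out
  exact key l.length l (le_refl _) out

-- ===== VERDICT (by name: the statement is the Claim_ definition above) =====
theorem Jeringoza_spec : Claim_equal_Jeringoza := by
  intro chosen _
  unfold Spec_Jeringoza Jeringoza Jeringoza_alt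
  rw [jerBLoop_flatten]
  simp
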